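-- pv_equiv track=rewrite | github.com/znb888/pysuqu | pysuqu/qubit/circuit.py | build_retain_nodes
-- ===== SOURCE A (Python) =====
-- from typing import Callable, Sequence
--
-- def build_retain_nodes(struct: Sequence[int]) -> list[int]:
--     """Rebuild retained-node indices from the circuit structure layout."""
--     retain_nodes = []
--     index = 0
--     for item in struct:
--         if item == 1:
--             retain_nodes.append(index)
--             index += 1
--         elif item == 2:
--             retain_nodes.append(index)
--             index += 2
--     return retain_nodes
-- ===== SOURCE B (Python) =====
-- def build_retain_nodes(struct):
--     """Rebuild retained-node indices from the circuit structure layout."""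
--     prefix = [0]
--     for x in struct:
--         prefix.append(prefix[-1] + (x if x == 1 or x == 2 else 0))
--     return [p for p, x in zip(prefix, struct) if x == 1 or x == 2]
-- ===== Notes on version B (the rewrite author's own statement) =====
-- stated objective: alternative
-- what changed: Replaces the single accumulator loop (append index, bump index per item) with an exclusive prefix-sum table of increments followed by a separate zip-filter pass that picks prefix values at positions holding 1 or 2.
import Mathlib
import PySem

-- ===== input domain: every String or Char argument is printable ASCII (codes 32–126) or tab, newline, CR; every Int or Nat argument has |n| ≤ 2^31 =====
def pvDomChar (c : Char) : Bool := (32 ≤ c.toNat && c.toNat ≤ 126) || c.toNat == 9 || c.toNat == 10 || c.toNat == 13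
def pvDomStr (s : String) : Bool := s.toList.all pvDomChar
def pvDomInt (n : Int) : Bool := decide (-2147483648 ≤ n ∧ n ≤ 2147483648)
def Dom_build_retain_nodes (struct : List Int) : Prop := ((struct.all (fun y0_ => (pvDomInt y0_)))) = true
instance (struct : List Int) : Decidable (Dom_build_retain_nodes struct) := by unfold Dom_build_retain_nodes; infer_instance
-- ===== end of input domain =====

-- B rebuilds the retained indices via an exclusive prefix-sum table of increments plus a zip-filter pass (alternative decomposition, same cost).


-- ===== PORT A =====
-- loop state: (retain_nodes, index)
def build_retain_nodes (struct : List Int) : List Int :=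
  (struct.foldl (fun (s : List Int × Int) item =>
      if item = 1 then (s.1 ++ [s.2], s.2 + 1)
      else if item = 2 then (s.1 ++ [s.2], s.2 + 2)
      else s) ([], 0)).1

-- ===== PORT B =====
-- prefix : exclusive prefix sums of the increments, built by the loop in Source B
def build_retain_nodes_alt (struct : List Int) : List Int :=
  let pre := struct.foldl
    (fun (acc : List Int) x => acc ++ [acc.getLast! + (if x = 1 ∨ x = 2 then x else 0)]) [0]
  (pre.zip struct).filterMap (fun px => if px.2 = 1 ∨ px.2 = 2 then some px.1 else none)

-- ===== PRECONDITION & SPEC =====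
def Spec_build_retain_nodes (struct : List Int) (out : List Int) : Prop := out = build_retain_nodes_alt struct
instance (struct : List Int) (out : List Int) : Decidable (Spec_build_retain_nodes struct out) := by unfold Spec_build_retain_nodes; infer_instance

-- ===== CLAIM (what is proved, stated in full; the proofs are below) =====
def Claim_equal_build_retain_nodes : Prop := ∀ (struct : List Int), Dom_build_retain_nodes struct → Spec_build_retain_nodes struct (build_retain_nodes struct)

-- ===== LEMMAS AND PROOFS =====

-- reference prefix-sum tail: pref s xs = running totals after each element, starting from s
def pref (s : Int) : List Int → List Int
  | [] => []
  | x :: xs => (s + (if x = 1 ∨ x = 2 then x else 0)) :: pref (s + (if x = 1 ∨ x = 2 then x else 0)) xs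

-- B's prefix loop from a nonempty accumulator appends the running totals
theorem b_fold_eq_pref (xs : List Int) (acc : List Int) :
    xs.foldl (fun (acc : List Int) x => acc ++ [acc.getLast! + (if x = 1 ∨ x = 2 then x else 0)]) acc
      = acc ++ pref acc.getLast! xs := by
  induction xs generalizing acc with
  | nil => simp [pref]
  | cons x xs ih =>
      simp only [List.foldl, pref]
      rw [ih]
      simp [List.append_assoc]

-- A's fold from state (acc, s) appends exactly the zip-filtered prefix values
theorem a_fold_eq (xs : List Int) (acc : List Int) (s : Int) :
    (xs.foldl (fun (st : List Int × Int) item =>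
        if item = 1 then (st.1 ++ [st.2], st.2 + 1)
        else if item = 2 then (st.1 ++ [st.2], st.2 + 2)
        else st) (acc, s)).1
      = acc ++ ((s :: pref s xs).zip xs).filterMap
          (fun px => if px.2 = 1 ∨ px.2 = 2 then some px.1 else none) := by
  induction xs generalizing acc s with
  | nil => simp
  | cons x xs ih =>
      simp only [List.foldl, pref, List.zip_cons_cons, List.filterMap_cons]
      by_cases h1 : x = 1
      · subst h1
        rw [if_pos rfl, ih]
        simp [List.append_assoc]
      · by_cases h2 : x = 2
        · subst h2
          rw [if_neg (by decide), if_pos rfl, ih]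
          simp [List.append_assoc]
        · have hne : ¬ (x = 1 ∨ x = 2) := by tauto
          rw [if_neg h1, if_neg h2, ih]
          simp [hne]

-- ===== VERDICT (by name: the statement is the Claim_ definition above) =====
theorem build_retain_nodes_spec : Claim_equal_build_retain_nodes := by
  intro struct _
  unfold Spec_build_retain_nodes build_retain_nodes build_retain_nodes_alt
  rw [a_fold_eq, b_fold_eq_pref]
  rfl
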